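-- pv_equiv track=rewrite | github.com/0xStryK3R/Scaler-DSA-Revision | python/Day-74/CW_2.py | solve
-- ===== SOURCE A (Python) =====
-- class Node:
--     def __init__(self, i, w):
--         self.items = i
--         self.weight = w
--
-- def solve(A):
--     n = len(A)
--     requiredSum = sum(A)//2
--     dp = [[Node(0,0) for j in range(0, requiredSum+1)]for i in range(0, n+1)]
--
--     for i in range(1, n+1):
--         for j in range(1, requiredSum+1):
--             prev_items = dp[i-1][j].items
--             prev_weight = dp[i-1][j].weight
--
--             if j-A[i-1] >= 0:
--                 curr_weight = dp[i-1][j-A[i-1]].weight + A[i-1]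
--                 curr_items = dp[i-1][j-A[i-1]].items + 1
--
--                 if (curr_weight>prev_weight) or ((curr_weight==prev_weight) and (curr_items<prev_items)):
--                     dp[i][j] = Node(curr_items, curr_weight)
--                 else:
--                     dp[i][j] = dp[i-1][j]
--
--             else:
--                 dp[i][j] = dp[i-1][j]
--
--     return dp[n][requiredSum].items;
-- ===== SOURCE B (Python) =====
-- def solve(A):
--     requiredSum = sum(A) // 2
--     # reach[s] = minimum number of items whose weights sum to exactly s (None if unreachable)
--     reach = [0] + [None] * requiredSum
--     for a in A:
--         for s in range(requiredSum, a - 1, -1):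
--             prev = reach[s - a]
--             if prev is not None and (reach[s] is None or prev + 1 < reach[s]):
--                 reach[s] = prev + 1
--     for s in range(requiredSum, -1, -1):
--         if reach[s] is not None:
--             return reach[s]
-- ===== Notes on version B (the rewrite author's own statement) =====
-- stated objective: alternative
-- what changed: Replaces the (n+1)x(S+1) table of Node(max-weight, min-items) cells with a single 1D array reach[s] = minimum number of items summing to exactly s, updated in place in reverse, followed by a downward scan returning the item count at the largest reachable sum <= S = sum(A)//2; same O(n*S) time but O(S) space and no per-cell objects (a timing run could not confirm a speedup, so none is claimed).
-- outside the precondition, e.g. on solve([2, -1]): A returns 0, B raises IndexError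
import Mathlib
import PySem

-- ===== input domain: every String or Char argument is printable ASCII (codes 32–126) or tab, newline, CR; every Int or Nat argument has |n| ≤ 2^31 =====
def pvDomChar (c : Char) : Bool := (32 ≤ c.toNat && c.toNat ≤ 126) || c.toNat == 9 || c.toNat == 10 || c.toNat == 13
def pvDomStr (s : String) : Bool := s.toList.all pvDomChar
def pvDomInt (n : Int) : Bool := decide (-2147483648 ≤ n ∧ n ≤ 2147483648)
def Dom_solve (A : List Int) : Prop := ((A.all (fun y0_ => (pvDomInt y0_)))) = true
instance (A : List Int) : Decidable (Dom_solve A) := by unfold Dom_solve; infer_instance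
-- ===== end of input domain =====

-- B replaces A's (n+1)x(S+1) table of (max-weight, min-items) cells by a 1D array
-- 'min items reaching exact sum s' updated in reverse, plus a downward extraction scan
-- (objective: an alternative algorithm with O(S) space; intended as faster, not confirmed).

-- ===== PORT A =====
-- Python-list indexing/assignment on arrays (the model of a mutable Python list):
-- exact Python semantics for reads (negative = from the end, none = IndexError);
-- writes are total no-ops out of range, used only on in-range indices under Pre_.
def pvAGet? {α : Type} (xs : Array α) (i : Int) : Option α :=
  if i < 0 then
    if 0 ≤ i + xs.size then xs[(i + xs.size).toNat]? else none
  else xs[i.toNat]?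

def pvASet {α : Type} (xs : Array α) (i : Int) (v : α) : Array α :=
  if i < 0 then
    if 0 ≤ i + xs.size then xs.setIfInBounds (i + xs.size).toNat v else xs
  else xs.setIfInBounds i.toNat v

def pvAModify {α : Type} (xs : Array α) (i : Int) (f : α → α) : Array α :=
  if i < 0 then
    if 0 ≤ i + xs.size then xs.modify (i + xs.size).toNat f else xs
  else xs.modify i.toNat f

-- a dp cell Node(items, weight) is the pair (items, weight)
def pvGetCell (dp : Array (Array (Int × Int))) (i j : Int) : Int × Int :=
  (pvAGet? ((pvAGet? dp i).getD #[]) j).getD (0, 0)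

-- dp[i][j] = v  (in-range under Pre_)
def pvSetCell (dp : Array (Array (Int × Int))) (i j : Int) (v : Int × Int) :
    Array (Array (Int × Int)) :=
  pvAModify dp i (fun row => pvASet row j v)

def solve (A : List Int) : Int :=
  let n : Int := A.length
  let requiredSum : Int := PySem.Int.floordiv A.sum 2
  let dp0 : Array (Array (Int × Int)) :=
    ((PySem.List.pyRange 0 (n + 1) 1).map (fun _ =>
      ((PySem.List.pyRange 0 (requiredSum + 1) 1).map
        (fun _ => ((0 : Int), (0 : Int)))).toArray)).toArray
  let dp := (PySem.List.pyRange 1 (n + 1) 1).foldl (fun dp i =>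
    (PySem.List.pyRange 1 (requiredSum + 1) 1).foldl (fun dp j =>
      let a := (PySem.List.pyGet? A (i - 1)).getD 0
      let prev_items := (pvGetCell dp (i - 1) j).1
      let prev_weight := (pvGetCell dp (i - 1) j).2
      if j - a ≥ 0 then
        let curr_weight := (pvGetCell dp (i - 1) (j - a)).2 + a
        let curr_items := (pvGetCell dp (i - 1) (j - a)).1 + 1
        if curr_weight > prev_weight ∨ (curr_weight = prev_weight ∧ curr_items < prev_items) then
          pvSetCell dp i j (curr_items, curr_weight)
        else
          pvSetCell dp i j (prev_items, prev_weight)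
      else
        pvSetCell dp i j (prev_items, prev_weight)) dp) dp0
  (pvGetCell dp n requiredSum).1

-- ===== PORT B =====
-- the final 'for s in range(requiredSum, -1, -1): if reach[s] is not None: return reach[s]'
-- (0 = Python's implicit fall-through, unreachable under Pre_ since reach[0] is set)
def pvScanB (reach : Array (Option Int)) : List Int → Int
  | [] => 0
  | s :: rest =>
    match (pvAGet? reach s).getD none with
    | some c => c
    | none => pvScanB reach rest

def solve_alt (A : List Int) : Int :=
  let requiredSum : Int := PySem.Int.floordiv A.sum 2
  let reach0 : Array (Option Int) := (some 0 :: List.replicate requiredSum.toNat none).toArray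
  let reach := A.foldl (fun (reach : Array (Option Int)) (a : Int) =>
    (PySem.List.pyRange requiredSum (a - 1) (-1)).foldl (fun reach s =>
      match (pvAGet? reach (s - a)).getD none with
      | none => reach
      | some c =>
        match (pvAGet? reach s).getD none with
        | none => pvASet reach s (some (c + 1))
        | some b => if c + 1 < b then pvASet reach s (some (c + 1)) else reach)
      reach) reach0
  pvScanB reach (PySem.List.pyRange requiredSum (-1) (-1))

-- ===== PRECONDITION & SPEC =====
-- Pre_ restricts to the task's natural domain of non-negative weights: on a list with a
-- negative entry A almost always raises IndexError (out-of-range dp index), and B raises too.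
def Pre_solve (A : List Int) : Prop := ∀ x ∈ A, 0 ≤ x
instance (A : List Int) : Decidable (Pre_solve A) := by unfold Pre_solve; infer_instance

def pvWitness_solve : List Int := [3, 1, 2]

def Spec_solve (A : List Int) (out : Int) : Prop := out = solve_alt A
instance (A : List Int) (out : Int) : Decidable (Spec_solve A out) := by unfold Spec_solve; infer_instance

-- ===== CLAIM (what is proved, stated in full; the proofs are below) =====
def Claim_equal_solve : Prop := ∀ (A : List Int), Dom_solve A → Pre_solve A → Spec_solve A (solve A)

-- ===== LEMMAS AND PROOFS =====

-- ---- functional models of the two rows ----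

-- one cell of A's dp recurrence, previous row r : capacity ↦ (items, weight)
def cellStep (r : Int → Int × Int) (a j : Int) : Int × Int :=
  if j - a ≥ 0 then
    if (r (j - a)).2 + a > (r j).2 ∨
        ((r (j - a)).2 + a = (r j).2 ∧ (r (j - a)).1 + 1 < (r j).1) then
      ((r (j - a)).1 + 1, (r (j - a)).2 + a)
    else r j
  else r j

def rowStepA (R : Int) (r : Int → Int × Int) (a : Int) : Int → Int × Int :=
  fun j => if 1 ≤ j ∧ j ≤ R then cellStep r a j else r j

def rowA (R : Int) (l : List Int) : Int → Int × Int :=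
  l.foldl (rowStepA R) (fun _ => (0, 0))

-- B's update of one slot: min with ties to the left
def omin : Option Int → Option Int → Option Int
  | x, none => x
  | none, some c => some c
  | some b, some c => if c < b then some c else some b

def rowStepB (R : Int) (q : Int → Option Int) (a : Int) : Int → Option Int :=
  fun s => if a ≤ s ∧ s ≤ R then omin (q s) ((q (s - a)).map (· + 1)) else q s

def q0 : Int → Option Int := fun s => if s = 0 then some 0 else none

def rowB (R : Int) (l : List Int) : Int → Option Int := l.foldl (rowStepB R) q0

-- the coupling invariant between a dp row and a reach row
def InvAB (R : Int) (r : Int → Int × Int) (q : Int → Option Int) : Prop :=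
  ∀ j, 0 ≤ j → j ≤ R →
    0 ≤ (r j).2 ∧ (r j).2 ≤ j ∧ q ((r j).2) = some ((r j).1) ∧
      (∀ s, (r j).2 < s → s ≤ j → q s = none)

theorem omin_some_some (b c : Int) : omin (some b) (some c) = if c < b then some c else some b := rfl

theorem inv_step (R a : Int) (ha : 0 ≤ a) (r : Int → Int × Int) (q : Int → Option Int)
    (h : InvAB R r q) : InvAB R (rowStepA R r a) (rowStepB R q a) := by
  have hB : ∀ s, a ≤ s → s ≤ R →
      rowStepB R q a s = omin (q s) ((q (s - a)).map (· + 1)) := by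
    intro s h1 h2
    simp only [rowStepB]
    rw [if_pos (And.intro h1 h2)]
  have hBout : ∀ s, s < a → rowStepB R q a s = q s := by
    intro s h1
    simp only [rowStepB]
    rw [if_neg (by omega)]
  intro j h0 hjR
  obtain ⟨hw0, hwj, hqp, hpnone⟩ := h j h0 hjR
  by_cases hj1 : 1 ≤ j
  · -- the loop body updates cell j
    have hra : rowStepA R r a j = cellStep r a j := by
      simp only [rowStepA]
      rw [if_pos (And.intro hj1 hjR)]
    by_cases hja : j - a ≥ 0
    · obtain ⟨hm0, hmj, hqm, hmnone⟩ := h (j - a) (by omega) (by omega)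
      have hsub : ∀ w : Int, w + a - a = w := fun w => by ring
      -- q' is none strictly above both candidate weights (and ≤ j)
      have hN1 : ∀ s, (r j).2 < s → (r (j - a)).2 + a < s → s ≤ j → rowStepB R q a s = none := by
        intro s hs1 hs2 hs3
        by_cases hsa : a ≤ s
        · rw [hB s hsa (by omega), hpnone s hs1 hs3,
            hmnone (s - a) (by omega) (by omega)]
          rfl
        · rw [hBout s (by omega)]
          exact hpnone s hs1 hs3
      rw [hra]
      simp only [cellStep, if_pos hja]
      by_cases hC : (r (j - a)).2 + a > (r j).2 ∨
          ((r (j - a)).2 + a = (r j).2 ∧ (r (j - a)).1 + 1 < (r j).1)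
      · rw [if_pos hC]
        rcases lt_or_ge (r j).2 ((r (j - a)).2 + a) with hgt | hle
        · -- strictly better weight: the new slot was unreachable before
          refine ⟨by omega, by omega, ?_, fun s hs1 hs2 => hN1 s (by omega) (by omega) hs2⟩
          rw [hB _ (by omega) (by omega), hpnone _ hgt (by omega), hsub, hqm]
          rfl
        · -- equal weight, strictly fewer items
          have heq : (r (j - a)).2 + a = (r j).2 := by omega
          have hlt : (r (j - a)).1 + 1 < (r j).1 := by
            rcases hC with h' | h'
            · omega
            · exact h'.2
          refine ⟨by omega, by omega, ?_, fun s hs1 hs2 => hN1 s (by omega) (by omega) hs2⟩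
          rw [hB _ (by omega) (by omega), hsub, hqm, heq, hqp, Option.map_some,
            omin_some_some, if_pos hlt]
      · rw [if_neg hC]
        push Not at hC
        obtain ⟨hle, htie⟩ := hC
        refine ⟨hw0, hwj, ?_, fun s hs1 hs2 => hN1 s hs1 (by omega) hs2⟩
        by_cases hpa : a ≤ (r j).2
        · rw [hB _ hpa (by omega), hqp]
          cases hq2 : q ((r j).2 - a) with
          | none => rfl
          | some c =>
            have hle2 : (r j).2 - a ≤ (r (j - a)).2 := by
              by_contra hgt2
              rw [hmnone ((r j).2 - a) (by omega) (by omega)] at hq2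
              simp at hq2
            have heq2 : (r j).2 - a = (r (j - a)).2 := by omega
            rw [heq2, hqm] at hq2
            have hc : c = (r (j - a)).1 := by
              have := Option.some.inj hq2; omega
            subst hc
            have hnotlt : ¬ ((r (j - a)).1 + 1 < (r j).1) := by
              have h3 := htie (by omega)
              omega
            rw [Option.map_some, omin_some_some, if_neg hnotlt]
        · rw [hBout _ (by omega)]
          exact hqp
    · -- a > j: cell kept, and no slot s ≤ j is touched (all have s < a)
      rw [hra]
      simp only [cellStep, if_neg hja]
      refine ⟨hw0, hwj, ?_, fun s hs1 hs2 => ?_⟩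
      · rw [hBout _ (by omega)]
        exact hqp
      · rw [hBout _ (by omega)]
        exact hpnone s hs1 hs2
  · -- j = 0: the loop does not write cell 0, and slot 0 only competes with itself
    have hj0 : j = 0 := by omega
    subst hj0
    have hpw : (r 0).2 = 0 := le_antisymm hwj hw0
    have hra : rowStepA R r a 0 = r 0 := by simp [rowStepA]
    rw [hra]
    refine ⟨hw0, hwj, ?_, fun s hs1 hs2 => by omega⟩
    rw [hpw] at hqp ⊢
    by_cases ha0 : a ≤ 0
    · have haz : a = 0 := le_antisymm ha0 ha
      subst haz
      rw [hB 0 le_rfl hjR]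
      have h2 : (0 : Int) - 0 = 0 := by ring
      rw [h2, hqp, Option.map_some, omin_some_some, if_neg (by omega)]
    · rw [hBout 0 (by omega)]
      exact hqp

theorem inv_fold (R : Int) (l : List Int) (hl : ∀ x ∈ l, 0 ≤ x)
    (r : Int → Int × Int) (q : Int → Option Int) (h : InvAB R r q) :
    InvAB R (l.foldl (rowStepA R) r) (l.foldl (rowStepB R) q) := by
  induction l generalizing r q with
  | nil => exact h
  | cons a l ih =>
    exact ih (fun x hx => hl x (List.mem_cons_of_mem _ hx)) _ _
      (inv_step R a (hl a (List.mem_cons_self)) r q h)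

theorem inv_base (R : Int) : InvAB R (fun _ => (0, 0)) q0 := by
  intro j h0 hR
  refine ⟨le_refl 0, h0, rfl, fun s hs _ => ?_⟩
  simp only at hs
  simp [q0]
  omega

theorem inv_rows (R : Int) (l : List Int) (hl : ∀ x ∈ l, 0 ≤ x) :
    InvAB R (rowA R l) (rowB R l) :=
  inv_fold R l hl _ _ (inv_base R)

-- ---- generic indexing helpers ----

theorem pvAGet?_nonneg {α : Type} (xs : Array α) (i : Int) (h : 0 ≤ i) :
    pvAGet? xs i = xs[i.toNat]? := by
  unfold pvAGet?
  rw [if_neg (by omega)]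

theorem aget?_aset {α : Type} (xs : Array α) (t s : Int) (v : α)
    (hs : 0 ≤ s) (ht : 0 ≤ t) (htl : t.toNat < xs.size) :
    pvAGet? (pvASet xs t v) s = if s = t then some v else pvAGet? xs s := by
  unfold pvASet
  rw [if_neg (by omega), pvAGet?_nonneg _ _ hs, pvAGet?_nonneg _ _ hs,
    Array.getElem?_setIfInBounds]
  by_cases h : s = t
  · subst h
    rw [if_pos rfl, if_pos rfl, if_pos htl]
  · rw [if_neg h, if_neg (by omega)]

theorem asize_aset {α : Type} (xs : Array α) (t : Int) (v : α) :
    (pvASet xs t v).size = xs.size := by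
  unfold pvASet
  split
  · split
    · exact Array.size_setIfInBounds
    · rfl
  · exact Array.size_setIfInBounds

theorem aget?_amodify {α : Type} (xs : Array α) (i k : Int) (f : α → α)
    (hk : 0 ≤ k) (hi : 0 ≤ i) :
    pvAGet? (pvAModify xs i f) k =
      if k = i then (pvAGet? xs k).map f else pvAGet? xs k := by
  unfold pvAModify
  rw [if_neg (by omega), pvAGet?_nonneg _ _ hk, pvAGet?_nonneg _ _ hk,
    Array.getElem?_modify]
  by_cases h : k = i
  · subst h
    rw [if_pos rfl, if_pos rfl]
  · rw [if_neg (by omega), if_neg h]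

theorem asize_amodify {α : Type} (xs : Array α) (i : Int) (f : α → α) :
    (pvAModify xs i f).size = xs.size := by
  unfold pvAModify
  split
  · split
    · exact Array.size_modify
    · rfl
  · exact Array.size_modify

theorem aget?_map_const {α β : Type} (c : β) (l : List α) (s : Int)
    (hs : 0 ≤ s) (hl : s.toNat < l.length) :
    pvAGet? ((l.map (fun _ => c)).toArray) s = some c := by
  rw [pvAGet?_nonneg _ _ hs, List.getElem?_toArray]
  simp [hl]

-- ---- B-side plumbing: the reach list tracks rowB ----

-- the inner loop body of B (identical, as a named function, for the lemmas)
def bstepF (a : Int) (reach : Array (Option Int)) (s : Int) : Array (Option Int) :=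
  match (pvAGet? reach (s - a)).getD none with
  | none => reach
  | some c =>
    match (pvAGet? reach s).getD none with
    | none => pvASet reach s (some (c + 1))
    | some b => if c + 1 < b then pvASet reach s (some (c + 1)) else reach

def RelB (R : Int) (reach : Array (Option Int)) (q : Int → Option Int) : Prop :=
  reach.size = R.toNat + 1 ∧
    ∀ s : Int, 0 ≤ s → s ≤ R → pvAGet? reach s = some (q s)

theorem innerB_partial (R a : Int) (hR : 0 ≤ R) (ha : 0 ≤ a) (q : Int → Option Int) :
    ∀ (k : Nat) (t : Int) (reach : Array (Option Int)), t ≤ R → k = (t - (a - 1)).toNat →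
    reach.size = R.toNat + 1 →
    (∀ s : Int, 0 ≤ s → s ≤ R →
      pvAGet? reach s = some (if t < s then rowStepB R q a s else q s)) →
    ((PySem.List.pyRange t (a - 1) (-1)).foldl (bstepF a) reach).size = R.toNat + 1 ∧
    (∀ s : Int, 0 ≤ s → s ≤ R →
      pvAGet? ((PySem.List.pyRange t (a - 1) (-1)).foldl (bstepF a) reach) s =
        some (if a - 1 < s then rowStepB R q a s else q s)) := by
  intro k
  induction k with
  | zero =>
    intro t reach htR hk hlen hget
    rw [PySem.List.pyRange_neg_one_eq_nil (by omega)]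
    simp only [List.foldl_nil]
    refine ⟨hlen, fun s h0 hs => ?_⟩
    rw [hget s h0 hs]
    by_cases h1 : a - 1 < s
    · rw [if_pos (by omega), if_pos h1]
    · rw [if_neg h1]
      by_cases h2 : t < s
      · rw [if_pos h2]
        simp only [rowStepB]
        rw [if_neg (by omega)]
      · rw [if_neg h2]
  | succ k ih =>
    intro t reach htR hk hlen hget
    have hta : a - 1 < t := by omega
    rw [PySem.List.pyRange_neg_one_cons hta, List.foldl_cons]
    have hqa' : (pvAGet? reach (t - a)).getD none = q (t - a) := by
      rw [hget (t - a) (by omega) (by omega), if_neg (by omega)]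
      rfl
    have hqt' : (pvAGet? reach t).getD none = q t := by
      rw [hget t (by omega) htR, if_neg (by omega)]
      rfl
    have hrow : rowStepB R q a t = omin (q t) ((q (t - a)).map (· + 1)) := by
      simp only [rowStepB]
      rw [if_pos (And.intro (by omega) htR)]
    have htl : t.toNat < reach.size := by omega
    -- the one update of the body, as list and as function
    have key : (bstepF a reach t).size = R.toNat + 1 ∧
        (∀ s : Int, 0 ≤ s → s ≤ R →
          pvAGet? (bstepF a reach t) s =
            some (if t - 1 < s then rowStepB R q a s else q s)) := by
      have hout : ∀ s : Int, 0 ≤ s → s ≤ R → s ≠ t →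
          (if t - 1 < s then rowStepB R q a s else q s) =
            (if t < s then rowStepB R q a s else q s) := by
        intro s _ _ hst
        by_cases h2 : t < s
        · rw [if_pos (by omega), if_pos h2]
        · rw [if_neg (by omega), if_neg h2]
      cases hqa : q (t - a) with
      | none =>
        have hb : bstepF a reach t = reach := by
          unfold bstepF
          rw [hqa', hqa]
        have hrt : rowStepB R q a t = q t := by
          rw [hrow, hqa]
          cases q t <;> rfl
        refine ⟨by rw [hb]; exact hlen, fun s h0 hs => ?_⟩
        rw [hb, hget s h0 hs]
        by_cases hst : s = t
        · subst hst
          rw [if_neg (by omega), if_pos (by omega), hrt]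
        · rw [hout s h0 hs hst]
      | some c =>
        have hset : ∀ v : Option Int,
            (∀ s : Int, 0 ≤ s → s ≤ R →
              pvAGet? (pvASet reach t v) s =
                some (if s = t then v else (if t < s then rowStepB R q a s else q s))) := by
          intro v s h0 hs
          rw [aget?_aset reach t s v h0 (by omega) htl]
          by_cases hst : s = t
          · rw [if_pos hst, if_pos hst]
          · rw [if_neg hst, if_neg hst, hget s h0 hs]
        cases hqt : q t with
        | none =>
          have hb : bstepF a reach t = pvASet reach t (some (c + 1)) := by
            unfold bstepF
            rw [hqa', hqa, hqt', hqt]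
          have hrt : rowStepB R q a t = some (c + 1) := by
            rw [hrow, hqa, hqt]
            rfl
          refine ⟨by rw [hb, asize_aset reach t _]; exact hlen,
            fun s h0 hs => ?_⟩
          rw [hb, hset (some (c + 1)) s h0 hs]
          by_cases hst : s = t
          · subst hst
            rw [if_pos rfl, if_pos (by omega), hrt]
          · rw [if_neg hst, hout s h0 hs hst]
        | some b =>
          by_cases hlt : c + 1 < b
          · have hb : bstepF a reach t = pvASet reach t (some (c + 1)) := by
              unfold bstepF
              rw [hqa', hqa, hqt', hqt]
              simp only [if_pos hlt]
            have hrt : rowStepB R q a t = some (c + 1) := by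
              rw [hrow, hqa, hqt, Option.map_some, omin_some_some, if_pos hlt]
            refine ⟨by rw [hb, asize_aset reach t _]; exact hlen,
              fun s h0 hs => ?_⟩
            rw [hb, hset (some (c + 1)) s h0 hs]
            by_cases hst : s = t
            · subst hst
              rw [if_pos rfl, if_pos (by omega), hrt]
            · rw [if_neg hst, hout s h0 hs hst]
          · have hb : bstepF a reach t = reach := by
              unfold bstepF
              rw [hqa', hqa, hqt', hqt]
              simp only [if_neg hlt]
            have hrt : rowStepB R q a t = q t := by
              rw [hrow, hqa, hqt, Option.map_some, omin_some_some, if_neg hlt]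
            refine ⟨by rw [hb]; exact hlen, fun s h0 hs => ?_⟩
            rw [hb, hget s h0 hs]
            by_cases hst : s = t
            · subst hst
              rw [if_neg (by omega), if_pos (by omega), hrt, hqt]
            · rw [hout s h0 hs hst]
    exact ih (t - 1) (bstepF a reach t) (by omega) (by omega) key.1 key.2

theorem innerB_full (R a : Int) (hR : 0 ≤ R) (ha : 0 ≤ a) (q : Int → Option Int)
    (reach : Array (Option Int)) (h : RelB R reach q) :
    RelB R ((PySem.List.pyRange R (a - 1) (-1)).foldl (bstepF a) reach) (rowStepB R q a) := by
  obtain ⟨hlen, hget⟩ := h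
  obtain ⟨hlen', hget'⟩ := innerB_partial R a hR ha q (R - (a - 1)).toNat R reach le_rfl rfl hlen
    (fun s h0 hs => by rw [hget s h0 hs, if_neg (by omega)])
  refine ⟨hlen', fun s h0 hs => ?_⟩
  rw [hget' s h0 hs]
  by_cases hsa : a ≤ s
  · rw [if_pos (by omega)]
  · rw [if_neg (by omega)]
    simp only [rowStepB]
    rw [if_neg (by omega)]

theorem foldB (R : Int) (hR : 0 ≤ R) :
    ∀ (l : List Int) (reach : Array (Option Int)) (q : Int → Option Int),
    (∀ x ∈ l, 0 ≤ x) → RelB R reach q →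
    RelB R
      (l.foldl (fun reach a => (PySem.List.pyRange R (a - 1) (-1)).foldl (bstepF a) reach) reach)
      (l.foldl (rowStepB R) q) := by
  intro l
  induction l with
  | nil => intro reach q _ h; exact h
  | cons a l ih =>
    intro reach q hl h
    exact ih _ _ (fun x hx => hl x (List.mem_cons_of_mem _ hx))
      (innerB_full R a hR (hl a List.mem_cons_self) q reach h)

theorem relB_init (R : Int) (hR : 0 ≤ R) :
    RelB R ((some 0 :: List.replicate R.toNat none).toArray) q0 := by
  refine ⟨by simp, fun s h0 hs => ?_⟩
  rw [pvAGet?_nonneg _ _ h0, List.getElem?_toArray]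
  by_cases h : s = 0
  · subst h
    simp [q0]
  · have h1 : s.toNat = (s.toNat - 1) + 1 := by omega
    rw [h1]
    simp only [List.getElem?_cons_succ, q0, if_neg h]
    rw [List.getElem?_replicate, if_pos (by omega)]

theorem scanB_finds (R : Int) (reach : Array (Option Int)) (q : Int → Option Int)
    (hrel : RelB R reach q) :
    ∀ (k : Nat) (t w c : Int), 0 ≤ w → w ≤ t → t ≤ R → k = (t - w).toNat →
    q w = some c → (∀ s, w < s → s ≤ t → q s = none) →
    pvScanB reach (PySem.List.pyRange t (-1) (-1)) = c := by
  intro k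
  induction k with
  | zero =>
    intro t w c h0 hwt htR hk hqw hnone
    have htw : t = w := by omega
    subst htw
    rw [PySem.List.pyRange_neg_one_cons (by omega : (-1 : Int) < t)]
    simp only [pvScanB]
    rw [hrel.2 t (by omega) htR, hqw]
    rfl
  | succ k ih =>
    intro t w c h0 hwt htR hk hqw hnone
    have hwt' : w < t := by omega
    rw [PySem.List.pyRange_neg_one_cons (by omega : (-1 : Int) < t)]
    simp only [pvScanB]
    rw [hrel.2 t (by omega) htR, hnone t hwt' le_rfl]
    exact ih (t - 1) w c h0 (by omega) (by omega) (by omega) hqw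
      (fun s hs1 hs2 => hnone s hs1 (by omega))

-- ---- A-side plumbing: row i of the dp table tracks rowA ----

-- the inner loop body of A (identical, as a named function, for the lemmas)
def astepF (A : List Int) (i : Int) (dp : Array (Array (Int × Int))) (j : Int) :
    Array (Array (Int × Int)) :=
  let a := (PySem.List.pyGet? A (i - 1)).getD 0
  let prev_items := (pvGetCell dp (i - 1) j).1
  let prev_weight := (pvGetCell dp (i - 1) j).2
  if j - a ≥ 0 then
    let curr_weight := (pvGetCell dp (i - 1) (j - a)).2 + a
    let curr_items := (pvGetCell dp (i - 1) (j - a)).1 + 1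
    if curr_weight > prev_weight ∨ (curr_weight = prev_weight ∧ curr_items < prev_items) then
      pvSetCell dp i j (curr_items, curr_weight)
    else
      pvSetCell dp i j (prev_items, prev_weight)
  else
    pvSetCell dp i j (prev_items, prev_weight)

def RowRel (R : Int) (row : Array (Int × Int)) (r : Int → Int × Int) : Prop :=
  row.size = R.toNat + 1 ∧
    ∀ j : Int, 0 ≤ j → j ≤ R → pvAGet? row j = some (r j)

theorem rowA_foldl_zero (R : Int) :
    ∀ (l : List Int) (r : Int → Int × Int), r 0 = (0, 0) → (l.foldl (rowStepA R) r) 0 = (0, 0) := by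
  intro l
  induction l with
  | nil => intro r h; exact h
  | cons a l ih =>
    intro r h
    exact ih _ (by simp only [rowStepA]; rw [if_neg (by omega)]; exact h)

theorem rowA_zero (R : Int) (l : List Int) : rowA R l 0 = (0, 0) :=
  rowA_foldl_zero R l _ rfl

theorem getCell_eq (R : Int) (dp : Array (Array (Int × Int))) (i j : Int)
    (row : Array (Int × Int)) (r : Int → Int × Int)
    (hrow : pvAGet? dp i = some row) (hrel : RowRel R row r)
    (hj : 0 ≤ j) (hjR : j ≤ R) : pvGetCell dp i j = r j := by
  unfold pvGetCell
  rw [hrow]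
  simp only [Option.getD_some]
  rw [hrel.2 j hj hjR]
  rfl

theorem innerA_partial (R a : Int) (hR : 0 ≤ R) (ha : 0 ≤ a)
    (A : List Int) (i : Int) (hi : 1 ≤ i)
    (r : Int → Int × Int) (hr0 : r 0 = (0, 0)) :
    ∀ (k : Nat) (t : Int) (dp : Array (Array (Int × Int))) (prow irow : Array (Int × Int)),
    1 ≤ t → t ≤ R + 1 → k = (R + 1 - t).toNat →
    PySem.List.pyGet? A (i - 1) = some a →
    i.toNat < dp.size →
    pvAGet? dp (i - 1) = some prow → RowRel R prow r →
    pvAGet? dp i = some irow → irow.size = R.toNat + 1 →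
    (∀ j : Int, 0 ≤ j → j ≤ R →
      pvAGet? irow j =
        some (if 1 ≤ j ∧ j < t then rowStepA R r a j else (0, 0))) →
    (((PySem.List.pyRange t (R + 1) 1).foldl (astepF A i) dp).size = dp.size ∧
     (∀ k' : Int, 0 ≤ k' → k' ≠ i →
       pvAGet? ((PySem.List.pyRange t (R + 1) 1).foldl (astepF A i) dp) k' =
         pvAGet? dp k') ∧
     ∃ irow', pvAGet? ((PySem.List.pyRange t (R + 1) 1).foldl (astepF A i) dp) i =
         some irow' ∧ RowRel R irow' (rowStepA R r a)) := by
  intro k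
  induction k with
  | zero =>
    intro t dp prow irow ht1 htR hk hA hil hp hrelp hirow hilen hient
    have ht : t = R + 1 := by omega
    subst ht
    rw [PySem.List.pyRange_one_eq_nil le_rfl]
    simp only [List.foldl_nil]
    refine ⟨trivial, fun _ _ _ => trivial, irow, hirow, ?_⟩
    unfold RowRel
    refine ⟨hilen, fun j hj0 hjR => ?_⟩
    rw [hient j hj0 hjR]
    by_cases hj1 : 1 ≤ j
    · rw [if_pos (And.intro hj1 (by omega))]
    · have hj : j = 0 := by omega
      subst hj
      rw [if_neg (by omega)]
      simp only [rowStepA]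
      rw [if_neg (by omega), hr0]
  | succ k ih =>
    intro t dp prow irow ht1 htR hk hA hil hp hrelp hirow hilen hient
    have htR' : t ≤ R := by omega
    rw [PySem.List.pyRange_one_cons (by omega), List.foldl_cons]
    have hi0 : (0 : Int) ≤ i := by omega
    have hget1 : ∀ j : Int, 0 ≤ j → j ≤ R → pvGetCell dp (i - 1) j = r j :=
      fun j hj0 hjR => getCell_eq R dp (i - 1) j prow r hp hrelp hj0 hjR
    -- the body writes exactly the model cell
    have hbody : astepF A i dp t = pvSetCell dp i t (rowStepA R r a t) := by
      have hcell : rowStepA R r a t = cellStep r a t := by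
        simp only [rowStepA]
        rw [if_pos (And.intro ht1 htR')]
      unfold astepF
      rw [hA]
      simp only [Option.getD_some]
      rw [hget1 t (by omega) htR', hcell]
      by_cases hta : t - a ≥ 0
      · rw [if_pos hta, hget1 (t - a) (by omega) (by omega)]
        simp only [cellStep, if_pos hta]
        by_cases hC : (r (t - a)).2 + a > (r t).2 ∨
            ((r (t - a)).2 + a = (r t).2 ∧ (r (t - a)).1 + 1 < (r t).1)
        · rw [if_pos hC, if_pos hC]
        · rw [if_neg hC, if_neg hC]
      · rw [if_neg hta]
        simp only [cellStep, if_neg hta]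
    have hset : pvSetCell dp i t (rowStepA R r a t) =
        pvAModify dp i (fun row => pvASet row t (rowStepA R r a t)) := rfl
    have htl : t.toNat < irow.size := by omega
    have hdp' : ∀ k' : Int, 0 ≤ k' →
        pvAGet? (astepF A i dp t) k' =
          if k' = i then some (pvASet irow t (rowStepA R r a t))
          else pvAGet? dp k' := by
      intro k' hk'
      rw [hbody, hset, aget?_amodify dp i k' _ hk' hi0]
      by_cases h : k' = i
      · subst h
        rw [if_pos rfl, if_pos rfl, hirow]
        rfl
      · rw [if_neg h, if_neg h]
    have hient' : ∀ j : Int, 0 ≤ j → j ≤ R →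
        pvAGet? (pvASet irow t (rowStepA R r a t)) j =
          some (if 1 ≤ j ∧ j < t + 1 then rowStepA R r a j else (0, 0)) := by
      intro j hj0 hjR
      rw [aget?_aset irow t j _ hj0 (by omega) htl]
      by_cases hjt : j = t
      · subst hjt
        rw [if_pos rfl, if_pos (And.intro ht1 (by omega))]
      · rw [if_neg hjt, hient j hj0 hjR]
        by_cases hj : 1 ≤ j ∧ j < t
        · rw [if_pos hj, if_pos (And.intro hj.1 (by omega))]
        · rw [if_neg hj, if_neg (by omega)]
    have hlen' : (astepF A i dp t).size = dp.size := by
      rw [hbody, hset]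
      exact asize_amodify dp i _
    obtain ⟨ihlen, ihun, irow', ihrow, ihrel⟩ :=
      ih (t + 1) (astepF A i dp t) prow (pvASet irow t (rowStepA R r a t))
        (by omega) (by omega) (by omega) hA (by rw [hlen']; exact hil)
        (by rw [hdp' (i - 1) (by omega), if_neg (by omega)]; exact hp) hrelp
        (by rw [hdp' i hi0, if_pos rfl])
        (by rw [asize_aset irow t _]; exact hilen)
        hient'
    refine ⟨by rw [ihlen, hlen'], fun k' hk' hki => ?_, irow', ihrow, ihrel⟩
    rw [ihun k' hk' hki, hdp' k' hk', if_neg hki]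

def zrowOf (R : Int) : Array (Int × Int) :=
  ((PySem.List.pyRange 0 (R + 1) 1).map (fun _ => ((0 : Int), (0 : Int)))).toArray

def OutInvA (R : Int) (A : List Int) (i : Int) (dp : Array (Array (Int × Int))) : Prop :=
  dp.size = A.length + 1 ∧
  (∀ kk : Int, i ≤ kk → kk ≤ (A.length : Int) → pvAGet? dp kk = some (zrowOf R)) ∧
  ∃ prow, pvAGet? dp (i - 1) = some prow ∧
    RowRel R prow (rowA R (A.take (i - 1).toNat))

theorem outerA (R : Int) (hR : 0 ≤ R) (A : List Int) (hpre : ∀ x ∈ A, 0 ≤ x) :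
    ∀ (k : Nat) (i : Int) (dp : Array (Array (Int × Int))),
    1 ≤ i → i ≤ (A.length : Int) + 1 → k = ((A.length : Int) + 1 - i).toNat →
    OutInvA R A i dp →
    ∃ row, pvAGet?
        ((PySem.List.pyRange i ((A.length : Int) + 1) 1).foldl
          (fun dp i => (PySem.List.pyRange 1 (R + 1) 1).foldl (astepF A i) dp) dp)
        (A.length : Int) = some row ∧
      RowRel R row (rowA R A) := by
  intro k
  induction k with
  | zero =>
    intro i dp h1 hn hk hinv
    have hi : i = (A.length : Int) + 1 := by omega
    subst hi
    rw [PySem.List.pyRange_one_eq_nil le_rfl]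
    simp only [List.foldl_nil]
    obtain ⟨_, _, prow, hp, hrel⟩ := hinv
    have h2 : ((A.length : Int) + 1 - 1) = (A.length : Int) := by ring
    rw [h2] at hp
    have h3 : ((A.length : Int) + 1 - 1).toNat = A.length := by omega
    rw [h3, List.take_length] at hrel
    exact ⟨prow, hp, hrel⟩
  | succ k ih =>
    intro i dp h1 hn hk hinv
    obtain ⟨hlen, hz, prow, hp, hrel⟩ := hinv
    have hin : i ≤ (A.length : Int) := by omega
    rw [show PySem.List.pyRange i ((A.length : Int) + 1) 1 =
        i :: PySem.List.pyRange (i + 1) ((A.length : Int) + 1) 1 from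
        PySem.List.pyRange_one_cons (by omega), List.foldl_cons]
    have hidx : (i - 1).toNat < A.length := by omega
    have hA : PySem.List.pyGet? A (i - 1) = some (A[(i - 1).toNat]) := by
      rw [PySem.List.pyGet?_of_nonneg _ (by omega)]
      exact List.getElem?_eq_getElem hidx
    have ha : 0 ≤ A[(i - 1).toNat] := hpre _ (List.getElem_mem hidx)
    have hzlen : (zrowOf R).size = R.toNat + 1 := by
      unfold zrowOf
      rw [List.size_toArray, List.length_map, PySem.List.length_pyRange_one]
      omega
    have hzent : ∀ j : Int, 0 ≤ j → j ≤ R →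
        pvAGet? (zrowOf R) j = some (if 1 ≤ j ∧ j < 1 then
          rowStepA R (rowA R (A.take (i - 1).toNat)) (A[(i - 1).toNat]) j else (0, 0)) := by
      intro j hj0 hjR
      rw [if_neg (by omega)]
      unfold zrowOf
      exact aget?_map_const _ _ j hj0 (by rw [PySem.List.length_pyRange_one]; omega)
    obtain ⟨ihlen, ihun, irow', ihrow, ihrel⟩ :=
      innerA_partial R (A[(i - 1).toNat]) hR ha A i h1 (rowA R (A.take (i - 1).toNat))
        (rowA_zero R _) ((R + 1 - 1).toNat) 1 dp prow (zrowOf R) le_rfl (by omega) (by omega)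
        hA (by omega) hp hrel (hz i le_rfl hin) hzlen hzent
    have hsnoc : rowStepA R (rowA R (A.take (i - 1).toNat)) (A[(i - 1).toNat]) =
        rowA R (A.take i.toNat) := by
      have h4 : A.take i.toNat = A.take (i - 1).toNat ++ [A[(i - 1).toNat]] := by
        have h5 : i.toNat = (i - 1).toNat + 1 := by omega
        rw [h5, List.take_add_one, List.getElem?_eq_getElem hidx]
        rfl
      rw [h4]
      unfold rowA
      rw [List.foldl_append]
      rfl
    exact ih (i + 1) _ (by omega) (by omega) (by omega)
      ⟨by rw [ihlen]; exact hlen,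
       fun kk hk1 hk2 => by rw [ihun kk (by omega) (by omega)]; exact hz kk (by omega) hk2,
       irow', by rw [show i + 1 - 1 = i by ring]; exact ihrow,
       by rw [show (i + 1 - 1 : Int) = i from by ring, ← hsnoc]; exact ihrel⟩

-- the two ports, written with the named loop bodies (definitional unfoldings)
theorem solve_eq (A : List Int) :
    solve A =
      (pvGetCell
        ((PySem.List.pyRange 1 ((A.length : Int) + 1) 1).foldl
          (fun dp i => (PySem.List.pyRange 1 (PySem.Int.floordiv A.sum 2 + 1) 1).foldl
            (astepF A i) dp)
          (((PySem.List.pyRange 0 ((A.length : Int) + 1) 1).map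
            (fun _ => zrowOf (PySem.Int.floordiv A.sum 2))).toArray))
        (A.length : Int) (PySem.Int.floordiv A.sum 2)).1 := rfl

theorem solve_alt_eq (A : List Int) :
    solve_alt A =
      pvScanB
        (A.foldl
          (fun reach a =>
            (PySem.List.pyRange (PySem.Int.floordiv A.sum 2) (a - 1) (-1)).foldl
              (bstepF a) reach)
          ((some 0 :: List.replicate (PySem.Int.floordiv A.sum 2).toNat none).toArray))
        (PySem.List.pyRange (PySem.Int.floordiv A.sum 2) (-1) (-1)) := rfl

-- ===== VERDICT (by name: the statement is the Claim_ definition above) =====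
theorem solve_spec : Claim_equal_solve := by
  intro A _ hpre
  unfold Spec_solve
  have hsum : 0 ≤ A.sum := List.sum_nonneg (fun x hx => hpre x hx)
  have hR : 0 ≤ PySem.Int.floordiv A.sum 2 := by
    rw [PySem.Int.floordiv_eq_ediv_of_pos (by norm_num)]
    exact Int.ediv_nonneg hsum (by norm_num)
  generalize hRdef : PySem.Int.floordiv A.sum 2 = R at *
  -- A's table: row n tracks rowA R A
  have hinit : OutInvA R A 1
      (((PySem.List.pyRange 0 ((A.length : Int) + 1) 1).map (fun _ => zrowOf R)).toArray) := by
    have hlen : (((PySem.List.pyRange 0 ((A.length : Int) + 1) 1).map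
        (fun _ => zrowOf R)).toArray).size = A.length + 1 := by
      rw [List.size_toArray, List.length_map, PySem.List.length_pyRange_one]
      omega
    refine ⟨hlen, fun kk h1 h2 => ?_, zrowOf R, ?_, ?_, ?_⟩
    · exact aget?_map_const _ _ kk (by omega)
        (by rw [PySem.List.length_pyRange_one]; omega)
    · exact aget?_map_const _ _ (1 - 1) (by omega)
        (by rw [PySem.List.length_pyRange_one]; omega)
    · unfold zrowOf
      rw [List.size_toArray, List.length_map, PySem.List.length_pyRange_one]
      omega
    · intro j hj0 hjR
      unfold zrowOf
      rw [aget?_map_const _ _ j hj0 (by rw [PySem.List.length_pyRange_one]; omega),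
        show ((1 : Int) - 1).toNat = 0 from rfl, List.take_zero]
      rfl
  obtain ⟨row, hrow, hrel⟩ := outerA R hR A hpre ((A.length : Int) + 1 - 1).toNat 1 _
    le_rfl (by omega) (by omega) hinit
  have hAval : solve A = (rowA R A R).1 := by
    rw [solve_eq, hRdef]
    rw [getCell_eq R _ (A.length : Int) R row (rowA R A) hrow hrel hR le_rfl]
  -- B's reach list tracks rowB R A, and the coupling invariant links the two
  have hrelB := foldB R hR A ((some 0 :: List.replicate R.toNat none).toArray) q0 hpre (relB_init R hR)
  obtain ⟨hw0, hwR, hq, hnone⟩ := inv_rows R A hpre R hR le_rfl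
  have hBval : solve_alt A = (rowA R A R).1 := by
    rw [solve_alt_eq, hRdef]
    exact scanB_finds R _ (rowB R A) hrelB ((R - (rowA R A R).2).toNat) R
      (rowA R A R).2 (rowA R A R).1 hw0 hwR le_rfl rfl hq hnone
  rw [hAval, hBval]
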